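-- pv_equiv track=rewrite | github.com/ASAPASMR-hue/michigan-guardianship-gemma | test_chunking_fix.py | chunk_text_by_sections
-- ===== SOURCE A (Python) =====
-- def chunk_text_by_sections(text: str, max_chunk_size: int = 300) -> list:
--     """
--     Chunk text by sections/paragraphs, ensuring each semantic unit stays together
--     """
--     chunks = []
--
--     # Split by double newlines first (paragraphs)
--     paragraphs = text.split('\n\n')
--
--     current_chunk = ""
--
--     for paragraph in paragraphs:
--         paragraph = paragraph.strip()
--         if not paragraph:
--             continue
--
--         # If paragraph is too long, split by sentences
--         if len(paragraph) > max_chunk_size: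
--             sentences = paragraph.split('. ')
--             for sentence in sentences:
--                 if not sentence.strip():
--                     continue
--                 sentence = sentence.strip() + '.'
--
--                 if len(current_chunk) + len(sentence) + 1 <= max_chunk_size:
--                     if current_chunk:
--                         current_chunk += " " + sentence
--                     else:
--                         current_chunk = sentence
--                 else:
--                     if current_chunk:
--                         chunks.append(current_chunk)
--                     current_chunk = sentence
--         else:
--             # If adding this paragraph exceeds limit, save current chunk
--             if current_chunk and len(current_chunk) + len(paragraph) + 1 > max_chunk_size:
--                 chunks.append(current_chunk)
--                 current_chunk = paragraph
--             else:
--                 if current_chunk: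
--                     current_chunk += "\n\n" + paragraph
--                 else:
--                     current_chunk = paragraph
--
--     # Add any remaining content
--     if current_chunk:
--         chunks.append(current_chunk)
--
--     return chunks
-- ===== SOURCE B (Python) =====
-- def chunk_text_by_sections(text: str, max_chunk_size: int = 300) -> list:
--     # Pass 1: flatten the text into (unit, separator) tokens.
--     units = []
--     for paragraph in text.split('\n\n'):
--         paragraph = paragraph.strip()
--         if not paragraph:
--             continue
--         if len(paragraph) > max_chunk_size:
--             for sentence in paragraph.split('. '):
--                 if sentence.strip():
--                     units.append((sentence.strip() + '.', ' '))
--         else: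
--             units.append((paragraph, '\n\n'))
--     # Pass 2: single greedy packing loop over the tokens.
--     chunks = []
--     current_chunk = ""
--     for unit, sep in units:
--         if current_chunk and len(current_chunk) + len(unit) + 1 > max_chunk_size:
--             chunks.append(current_chunk)
--             current_chunk = unit
--         elif current_chunk:
--             current_chunk += sep + unit
--         else:
--             current_chunk = unit
--     if current_chunk:
--         chunks.append(current_chunk)
--     return chunks
-- ===== Notes on version B (the rewrite author's own statement) =====
-- stated objective: simpler
-- what changed: Replaced A's interleaved per-paragraph/per-sentence packing branches with a two-pass tokenize-then-pack structure: pass 1 flattens the text into (unit, separator) tokens, pass 2 is a single greedy packing loop.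
import Mathlib
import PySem

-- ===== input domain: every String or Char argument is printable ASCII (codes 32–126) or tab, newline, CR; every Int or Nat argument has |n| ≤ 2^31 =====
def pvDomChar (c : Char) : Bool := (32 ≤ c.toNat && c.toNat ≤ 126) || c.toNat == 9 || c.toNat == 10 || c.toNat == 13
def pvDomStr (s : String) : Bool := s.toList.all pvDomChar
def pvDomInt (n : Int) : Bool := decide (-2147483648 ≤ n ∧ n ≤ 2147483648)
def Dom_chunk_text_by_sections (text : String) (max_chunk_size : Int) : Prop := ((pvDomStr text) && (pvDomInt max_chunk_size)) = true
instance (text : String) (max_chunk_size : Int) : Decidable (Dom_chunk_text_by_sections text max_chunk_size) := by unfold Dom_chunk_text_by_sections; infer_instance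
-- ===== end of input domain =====

-- B replaces A's two interleaved branch-specific packing bodies by a tokenize-then-pack
-- decomposition (one pass producing (unit, separator) tokens, one greedy packing loop); objective: simpler.

-- ===== PORT A =====
-- inner sentence loop body of A (state = (chunks, current_chunk))
def pvStepSentA (mx : Int) (st : List String × String) (sentence : String) : List String × String :=
  if PySem.Str.strip sentence = "" then st
  else
    let s := PySem.Str.strip sentence ++ "."
    if PySem.Str.len st.2 + PySem.Str.len s + 1 ≤ mx then
      if st.2 ≠ "" then (st.1, st.2 ++ " " ++ s) else (st.1, s)
    else
      if st.2 ≠ "" then (st.1 ++ [st.2], s) else (st.1, s)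

-- outer paragraph loop body of A
def pvStepParA (mx : Int) (st : List String × String) (para : String) : List String × String :=
  let p := PySem.Str.strip para
  if p = "" then st
  else if PySem.Str.len p > mx then
    List.foldl (pvStepSentA mx) st ((PySem.Str.split? p ". ").getD [])
  else
    if st.2 ≠ "" ∧ PySem.Str.len st.2 + PySem.Str.len p + 1 > mx then (st.1 ++ [st.2], p)
    else if st.2 ≠ "" then (st.1, st.2 ++ "\n\n" ++ p) else (st.1, p)

def chunk_text_by_sections (text : String) (max_chunk_size : Int) : List String :=
  let st := List.foldl (pvStepParA max_chunk_size) ([], "") ((PySem.Str.split? text "\n\n").getD [])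
  if st.2 ≠ "" then st.1 ++ [st.2] else st.1

-- ===== PORT B =====
-- pass 1 of B: tokens (unit, separator) of one paragraph
def pvUnitsOfPar (mx : Int) (para : String) : List (String × String) :=
  let p := PySem.Str.strip para
  if p = "" then []
  else if PySem.Str.len p > mx then
    ((PySem.Str.split? p ". ").getD []).foldl
      (fun acc s => if PySem.Str.strip s ≠ "" then acc ++ [(PySem.Str.strip s ++ ".", " ")] else acc) []
  else [(p, "\n\n")]

-- pass 2 of B: the single greedy packing step
def pvPack (mx : Int) (st : List String × String) (u : String × String) : List String × String :=
  if st.2 ≠ "" ∧ PySem.Str.len st.2 + PySem.Str.len u.1 + 1 > mx then (st.1 ++ [st.2], u.1)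
  else if st.2 ≠ "" then (st.1, st.2 ++ u.2 ++ u.1)
  else (st.1, u.1)

def chunk_text_by_sections_alt (text : String) (max_chunk_size : Int) : List String :=
  let units := ((PySem.Str.split? text "\n\n").getD []).foldl
      (fun acc p => acc ++ pvUnitsOfPar max_chunk_size p) []
  let st := units.foldl (pvPack max_chunk_size) ([], "")
  if st.2 ≠ "" then st.1 ++ [st.2] else st.1

-- ===== PRECONDITION & SPEC =====
def Spec_chunk_text_by_sections (text : String) (max_chunk_size : Int) (out : List String) : Prop := out = chunk_text_by_sections_alt text max_chunk_size
instance (text : String) (max_chunk_size : Int) (out : List String) : Decidable (Spec_chunk_text_by_sections text max_chunk_size out) := by unfold Spec_chunk_text_by_sections; infer_instance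

-- ===== CLAIM (what is proved, stated in full; the proofs are below) =====
def Claim_equal_chunk_text_by_sections : Prop := ∀ (text : String) (max_chunk_size : Int), Dom_chunk_text_by_sections text max_chunk_size → Spec_chunk_text_by_sections text max_chunk_size (chunk_text_by_sections text max_chunk_size)

-- ===== LEMMAS AND PROOFS =====

-- the conditional-append loops building the token lists are flatMaps
theorem tokensSent_eq (sents : List String) :
    sents.foldl (fun acc s => if PySem.Str.strip s ≠ "" then acc ++ [(PySem.Str.strip s ++ ".", " ")] else acc) [] =
      sents.flatMap (fun s => if PySem.Str.strip s ≠ "" then [(PySem.Str.strip s ++ ".", " ")] else []) := by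
  have h : (fun (acc : List (String × String)) s => if PySem.Str.strip s ≠ "" then acc ++ [(PySem.Str.strip s ++ ".", " ")] else acc)
      = fun acc s => acc ++ (if PySem.Str.strip s ≠ "" then [(PySem.Str.strip s ++ ".", " ")] else []) := by
    funext acc s; split_ifs <;> simp
  rw [h, PySem.List.foldl_append_eq_flatMap]; rfl

theorem tokensPar_eq (mx : Int) (ps : List String) :
    ps.foldl (fun acc p => acc ++ pvUnitsOfPar mx p) [] = ps.flatMap (pvUnitsOfPar mx) := by
  rw [PySem.List.foldl_append_eq_flatMap]; rfl

-- one sentence step of A is one pack step of B on its token (or a no-op on an empty sentence)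
theorem stepSent_eq_pack (mx : Int) (st : List String × String) (s : String) :
    pvStepSentA mx st s =
      (if PySem.Str.strip s ≠ "" then pvPack mx st (PySem.Str.strip s ++ ".", " ") else st) := by
  unfold pvStepSentA pvPack
  split_ifs <;> simp_all

-- A's inner sentence loop = B's pack loop over the sentence tokens
theorem foldSent_eq_pack (mx : Int) (sents : List String) (st : List String × String) :
    List.foldl (pvStepSentA mx) st sents =
      List.foldl (pvPack mx) st
        (sents.flatMap (fun s => if PySem.Str.strip s ≠ "" then [(PySem.Str.strip s ++ ".", " ")] else [])) := by
  induction sents generalizing st with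
  | nil => rfl
  | cons s rest ih =>
    rw [List.flatMap_cons, List.foldl_append, List.foldl_cons, stepSent_eq_pack]
    by_cases h : PySem.Str.strip s = ""
    · simp [h, ih]
    · simp [h, ih]

-- one paragraph step of A is B's pack loop over that paragraph's tokens
theorem stepPar_eq_pack (mx : Int) (st : List String × String) (p : String) :
    pvStepParA mx st p = List.foldl (pvPack mx) st (pvUnitsOfPar mx p) := by
  unfold pvStepParA pvUnitsOfPar
  by_cases h : PySem.Str.strip p = ""
  · simp [h]
  · by_cases hl : PySem.Str.len (PySem.Str.strip p) > mx
    · rw [if_neg h, if_neg h, if_pos hl, if_pos hl, tokensSent_eq, foldSent_eq_pack]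
    · rw [if_neg h, if_neg h, if_neg hl, if_neg hl, List.foldl_cons, List.foldl_nil]
      unfold pvPack
      split_ifs <;> simp_all

-- A's whole loop = B's pack loop over the flattened token list
theorem foldPar_eq_pack (mx : Int) (ps : List String) (st : List String × String) :
    List.foldl (pvStepParA mx) st ps =
      List.foldl (pvPack mx) st (ps.flatMap (pvUnitsOfPar mx)) := by
  induction ps generalizing st with
  | nil => rfl
  | cons p rest ih =>
    rw [List.flatMap_cons, List.foldl_append, List.foldl_cons, stepPar_eq_pack, ih]

-- ===== VERDICT (by name: the statement is the Claim_ definition above) =====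
theorem chunk_text_by_sections_spec : Claim_equal_chunk_text_by_sections := by
  intro text mx _
  unfold Spec_chunk_text_by_sections chunk_text_by_sections chunk_text_by_sections_alt
  rw [tokensPar_eq, foldPar_eq_pack]
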